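-- pv_equiv track=rewrite | github.com/chanedwin/pydistinct | pydistinct/utils.py | _get_frequency_dictionary
-- ===== SOURCE A (Python) =====
-- def _get_attribute_counts(sequence):
--     """
--     counts each unique attribute in a sequence
--
--     :param sequence: observed sequence of integers
--     :type sequence: list of int
--     :return: dictionary with keys as attribute counts and values as counts of these attribute_counts
--     :rtype: dictionary (str -> int)
--     """
--     from itertools import groupby
--
--     attribute_counts = {}
--     for key, group in groupby(sorted(sequence), key=lambda x: x):
--         attribute_counts[key] = len(list(group))
--
--     return attribute_counts
--
-- def _get_frequency_dictionary(sequence=None, attributes=None):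
--     """
--     counts the frequency of attribute counts (group by count)
--
--     :param sequence: observed sequence of integers
--     :type sequence: list of int
--     :return: dictionary with keys as frequencies and values as counts of these frequency
--     :rtype: dict
--     """
--     from itertools import groupby
--     if not (sequence is not None or attributes is not None):
--         raise Exception("Must provide sequence or attribute counts")
--
--     if sequence is not None:
--         attribute_counts = _get_attribute_counts(sequence)
--     else:
--         attribute_counts = attributes
--
--     frequency_dictionary = {}
--     for key, group in groupby(sorted(attribute_counts.items(), key=lambda x: x[1]), key=lambda x: x[1]):
--         frequency_dictionary[key] = len(list(group))
--
--     return frequency_dictionary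
-- ===== SOURCE B (Python) =====
-- def _get_frequency_dictionary(sequence=None, attributes=None):
--     """Single-pass hash counting instead of sort+groupby for the attribute
--     counts; then one counting pass over the sorted count values."""
--     if sequence is None and attributes is None:
--         raise Exception("Must provide sequence or attribute counts")
--
--     if sequence is not None:
--         counts = {}
--         for x in sequence:
--             counts[x] = counts.get(x, 0) + 1
--         values = counts.values()
--     else:
--         values = attributes.values()
--
--     frequency_dictionary = {}
--     for v in sorted(values):
--         frequency_dictionary[v] = frequency_dictionary.get(v, 0) + 1
--     return frequency_dictionary
-- ===== Notes on version B (the rewrite author's own statement) =====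
-- stated objective: faster
-- what changed: Replaces both sort+itertools.groupby counting stages with single-pass hash accumulation: a dict counter over the raw sequence (no sort of the sequence, no groupby) and a counting pass over the sorted count values (only the distinct-value counts are sorted).
import Mathlib
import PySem

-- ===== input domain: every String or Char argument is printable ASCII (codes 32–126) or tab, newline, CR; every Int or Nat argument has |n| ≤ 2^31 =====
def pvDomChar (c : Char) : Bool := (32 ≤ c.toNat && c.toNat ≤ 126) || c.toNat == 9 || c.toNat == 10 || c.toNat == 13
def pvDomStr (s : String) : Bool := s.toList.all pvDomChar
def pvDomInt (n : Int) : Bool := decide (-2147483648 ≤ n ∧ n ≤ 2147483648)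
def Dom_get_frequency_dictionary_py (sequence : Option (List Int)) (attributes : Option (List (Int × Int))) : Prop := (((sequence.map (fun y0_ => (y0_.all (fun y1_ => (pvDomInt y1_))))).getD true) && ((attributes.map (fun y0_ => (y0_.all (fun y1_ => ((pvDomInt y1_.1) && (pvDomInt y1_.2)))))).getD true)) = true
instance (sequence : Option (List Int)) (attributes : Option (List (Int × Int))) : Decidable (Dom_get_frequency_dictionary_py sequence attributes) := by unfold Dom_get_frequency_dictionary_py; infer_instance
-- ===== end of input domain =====

-- B replaces both sort+itertools.groupby counting stages of A with single-pass hash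
-- (dict) accumulation; equivalence is proved for the returned dict (no argument is mutated).

-- ===== PORT A =====
-- 'for key, group in groupby(sorted(l)): out[key] = len(list(group))' — the list of
-- (key, len(group)) pairs that A's groupby loop visits, in order.
def pyGroupLens (l : List Int) : List (Int × Int) :=
  match l with
  | [] => []
  | x :: xs =>
      (x, 1 + ((xs.takeWhile (fun y => y == x)).length : Int)) ::
        pyGroupLens (xs.dropWhile (fun y => y == x))
termination_by l.length
decreasing_by
  exact Nat.lt_succ_of_le (List.length_dropWhile_le _ _)

-- same groupby loop, key = lambda x: x[1] (over dict items)
def pyGroupLensSnd (l : List (Int × Int)) : List (Int × Int) :=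
  match l with
  | [] => []
  | p :: xs =>
      (p.2, 1 + ((xs.takeWhile (fun q => q.2 == p.2)).length : Int)) ::
        pyGroupLensSnd (xs.dropWhile (fun q => q.2 == p.2))
termination_by l.length
decreasing_by
  exact Nat.lt_succ_of_le (List.length_dropWhile_le _ _)

-- _get_attribute_counts: dict built from groupby(sorted(sequence))
def get_attribute_counts_py (sequence : List Int) : PySem.Dict Int Int :=
  (pyGroupLens (PySem.List.sorted sequence (fun x => x))).foldl
    (fun d p => d.insert p.1 p.2) PySem.Dict.empty

def get_frequency_dictionary_py (sequence : Option (List Int)) (attributes : Option (List (Int × Int))) : List (Int × Int) :=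
  match sequence, attributes with
  | none, none => []  -- Python raises Exception here; excluded by Pre_
  | _, _ =>
    let attribute_counts : PySem.Dict Int Int :=
      match sequence with
      | some s => get_attribute_counts_py s
      | none => PySem.Dict.ofList (attributes.getD [])
    ((pyGroupLensSnd (PySem.List.sorted attribute_counts.items (fun p => p.2))).foldl
      (fun d p => d.insert p.1 p.2) PySem.Dict.empty).items

-- ===== PORT B =====
def get_frequency_dictionary_py_alt (sequence : Option (List Int)) (attributes : Option (List (Int × Int))) : List (Int × Int) :=
  match sequence, attributes with
  | some s, _ =>  -- counts[x] = counts.get(x, 0) + 1 over the raw sequence, then .values()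
      ((PySem.List.sorted
          ((s.foldl (fun d x => d.insert x (d.getD x 0 + 1)) PySem.Dict.empty).values)
          (fun v => v)).foldl
        (fun d v => d.insert v (d.getD v 0 + 1)) PySem.Dict.empty).items
  | none, some a =>
      ((PySem.List.sorted ((PySem.Dict.ofList a).values) (fun v => v)).foldl
        (fun d v => d.insert v (d.getD v 0 + 1)) PySem.Dict.empty).items
  | none, none => []  -- raise Exception; excluded by Pre_

-- ===== PRECONDITION & SPEC =====
-- Pre_ excludes only sequence = None ∧ attributes = None, where A raises Exception.
def Pre_get_frequency_dictionary_py (sequence : Option (List Int)) (attributes : Option (List (Int × Int))) : Prop :=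
  sequence.isSome ∨ attributes.isSome
instance (sequence : Option (List Int)) (attributes : Option (List (Int × Int))) : Decidable (Pre_get_frequency_dictionary_py sequence attributes) := by unfold Pre_get_frequency_dictionary_py; infer_instance

def pvWitness_get_frequency_dictionary_py : Option (List Int) × (Option (List (Int × Int))) :=
  (some [1, 2, 2, 3], none)

def Spec_get_frequency_dictionary_py (sequence : Option (List Int)) (attributes : Option (List (Int × Int))) (out : List (Int × Int)) : Prop := out = get_frequency_dictionary_py_alt sequence attributes
instance (sequence : Option (List Int)) (attributes : Option (List (Int × Int))) (out : List (Int × Int)) : Decidable (Spec_get_frequency_dictionary_py sequence attributes out) := by unfold Spec_get_frequency_dictionary_py; infer_instance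

-- ===== CLAIM (what is proved, stated in full; the proofs are below) =====
def Claim_equal_get_frequency_dictionary_py : Prop := ∀ (sequence : Option (List Int)) (attributes : Option (List (Int × Int))), Dom_get_frequency_dictionary_py sequence attributes → Pre_get_frequency_dictionary_py sequence attributes → Spec_get_frequency_dictionary_py sequence attributes (get_frequency_dictionary_py sequence attributes)

-- ===== LEMMAS AND PROOFS =====

theorem pyGroupLensSnd_eq_map (l : List (Int × Int)) :
    pyGroupLensSnd l = pyGroupLens (l.map (fun p => p.2)) := by
  induction l using pyGroupLensSnd.induct with
  | case1 => simp [pyGroupLensSnd, pyGroupLens]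
  | case2 p xs ih =>
    rw [pyGroupLensSnd, List.map_cons, pyGroupLens, List.takeWhile_map, List.dropWhile_map]
    simp only [Function.comp_def, List.length_map, ih]

theorem dedup_cons_run (x : Int) (t d : List Int) (ht : ∀ y ∈ t, y = x) (hd : x ∉ d) :
    PySem.List.dedup (x :: (t ++ d)) = x :: PySem.List.dedup d := by
  induction t with
  | nil =>
    simp only [List.nil_append, PySem.List.dedup_eq_ofList, PySem.Set.ofList_cons]
    congr 1
    simp only [PySem.Set.discard]
    apply List.filter_eq_self.mpr
    intro y hy
    have : y ≠ x := by
      intro h; subst h; exact hd ((PySem.Set.mem_ofList d y).mp hy)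
    simp [this]
  | cons y t' ih =>
    have hy : y = x := ht y (by simp)
    rw [hy]
    have hrec := ih (fun z hz => ht z (by simp [hz]))
    calc PySem.List.dedup (x :: ((x :: t') ++ d))
        = x :: PySem.Set.discard (x :: PySem.Set.discard (PySem.Set.ofList (t' ++ d)) x) x := by
          simp only [PySem.List.dedup_eq_ofList, List.cons_append, PySem.Set.ofList_cons]
      _ = x :: PySem.Set.discard (PySem.Set.ofList (t' ++ d)) x := by
          simp [PySem.Set.discard, List.filter_filter]
      _ = PySem.List.dedup (x :: (t' ++ d)) := by
          simp only [PySem.List.dedup_eq_ofList, PySem.Set.ofList_cons]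
      _ = x :: PySem.List.dedup d := hrec

theorem pyGroupLens_sorted_eq (l : List Int) (hs : l.Pairwise (· ≤ ·)) :
    pyGroupLens l = (PySem.List.dedup l).map (fun k => (k, (l.count k : Int))) := by
  induction l using pyGroupLens.induct with
  | case1 => simp [pyGroupLens]
  | case2 x xs ih =>
    have hxs : xs.takeWhile (fun y => y == x) ++ xs.dropWhile (fun y => y == x) = xs :=
      List.takeWhile_append_dropWhile
    set t := xs.takeWhile (fun y => y == x) with ht_def
    set d := xs.dropWhile (fun y => y == x) with hd_def
    have htx : ∀ y ∈ t, y = x := fun y hy => by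
      have := List.mem_takeWhile_imp hy; simpa using this
    -- sortedness pieces
    have hxall : ∀ y ∈ xs, x ≤ y := (List.pairwise_cons.mp hs).1
    have hxs_pw : xs.Pairwise (· ≤ ·) := (List.pairwise_cons.mp hs).2
    have hd_pw : d.Pairwise (· ≤ ·) := hxs_pw.sublist (List.dropWhile_sublist _)
    have hd_sub : ∀ y ∈ d, y ∈ xs := fun y hy => (List.dropWhile_sublist _).mem hy
    -- x is not in d
    have hxd : x ∉ d := by
      intro hmem
      cases hdd : d with
      | nil => rw [hdd] at hmem; simp at hmem
      | cons h r =>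
        have hhead : ¬ (h == x) = true := by
          have := List.head?_dropWhile_not (fun y => y == x) xs
          rw [← hd_def, hdd] at this
          simpa using this
        have hne : h ≠ x := fun he => hhead (by simp [he])
        have hxh : x ≤ h := hxall h (hd_sub h (by rw [hdd]; simp))
        have hlt : x < h := lt_of_le_of_ne hxh (fun he => hne he.symm)
        rw [hdd] at hmem
        rcases List.mem_cons.mp hmem with he | hr
        · exact hne he.symm
        · have : h ≤ x := by
            have := hd_pw
            rw [hdd] at this
            exact (List.pairwise_cons.mp this).1 x hr
          omega
    have ihd := ih hd_pw
    -- counts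
    have hcx : (x :: xs).count x = t.length + 1 := by
      rw [List.count_cons_self, ← hxs, List.count_append]
      have h1 : t.count x = t.length := List.count_eq_length.mpr (fun b hb => (htx b hb).symm)
      have h2 : d.count x = 0 := List.count_eq_zero_of_not_mem hxd
      omega
    have hck : ∀ k ∈ d, (x :: xs).count k = d.count k := by
      intro k hk
      have hkx : k ≠ x := fun he => hxd (he ▸ hk)
      rw [List.count_cons_of_ne (Ne.symm hkx), ← hxs, List.count_append]
      have : t.count k = 0 := by
        apply List.count_eq_zero_of_not_mem
        intro hkt; exact hkx (htx k hkt)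
      omega
    have hded : PySem.List.dedup (x :: xs) = x :: PySem.List.dedup d := by
      rw [← hxs]; exact dedup_cons_run x t d htx hxd
    rw [pyGroupLens, ihd, hded, List.map_cons]
    congr 1
    · have hcast : ((x :: xs).count x : Int) = 1 + (t.length : Int) := by
        rw [hcx]; push_cast; ring
      rw [hcast]
    · apply List.map_congr_left
      intro k hk
      have hkd : k ∈ d := by
        simpa [PySem.List.dedup_eq_ofList, PySem.Set.mem_ofList] using hk
      rw [hck k hkd]

theorem map_snd_sorted (l : List (Int × Int)) :
    (PySem.List.sorted l (fun p => p.2)).map (fun p => p.2)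
      = PySem.List.sorted (l.map (fun p => p.2)) (fun v => v) := by
  apply (PySem.List.sorted_id_eq_of_perm_of_pairwise _ _ _ _).symm
  · exact (PySem.List.sorted_perm l (fun p => p.2) false).map _
  · exact (PySem.List.sorted_pairwise l (fun p => p.2)).map _ (fun a b h => h)

theorem stage2_eq (items : List (Int × Int)) :
    ((pyGroupLensSnd (PySem.List.sorted items (fun p => p.2))).foldl
        (fun d p => d.insert p.1 p.2) PySem.Dict.empty).items
      = ((PySem.List.sorted (items.map (fun p => p.2)) (fun v => v)).foldl
          (fun d v => d.insert v (d.getD v 0 + 1)) PySem.Dict.empty).items := by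
  set sv := PySem.List.sorted (items.map (fun p => p.2)) (fun v => v) with hsv
  have hpw : sv.Pairwise (· ≤ ·) :=
    PySem.List.sorted_pairwise (items.map (fun p => p.2)) (fun v => v)
  have hG : pyGroupLensSnd (PySem.List.sorted items (fun p => p.2))
      = (PySem.List.dedup sv).map (fun k => (k, (sv.count k : Int))) := by
    rw [pyGroupLensSnd_eq_map, map_snd_sorted, ← hsv]
    exact pyGroupLens_sorted_eq sv hpw
  -- LHS: fold of inserts over fresh distinct keys
  have hkeys : (((PySem.List.dedup sv).map (fun k => (k, (sv.count k : Int)))).map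
      (fun p => p.1)).Nodup := by
    simp only [List.map_map]
    simp [Function.comp_def, PySem.List.dedup_eq_ofList, PySem.Set.nodup_ofList sv]
  have hlhs := PySem.Dict.items_foldl_insert_fresh
      ((PySem.List.dedup sv).map (fun k => (k, (sv.count k : Int))))
      (fun p => p.1) (fun p => p.2) PySem.Dict.empty
      (fun a _ => PySem.Dict.contains_empty _) hkeys
  rw [hG, hlhs]
  rw [PySem.Dict.foldl_insert_getD_add_one_eq_counter, PySem.Dict.items_counter]
  simp [PySem.Dict.empty, PySem.List.dedup_eq_ofList]

theorem stage1_values_perm (s : List Int) :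
    ((get_attribute_counts_py s).values).Perm
      ((s.foldl (fun d x => d.insert x (d.getD x 0 + 1)) PySem.Dict.empty).values) := by
  set ss := PySem.List.sorted s (fun x => x) with hss
  have hpw : ss.Pairwise (· ≤ ·) := PySem.List.sorted_pairwise s (fun x => x)
  have hG := pyGroupLens_sorted_eq ss hpw
  have hkeys : (((PySem.List.dedup ss).map (fun k => (k, (ss.count k : Int)))).map
      (fun p => p.1)).Nodup := by
    simp only [List.map_map]
    simp [Function.comp_def, PySem.List.dedup_eq_ofList, PySem.Set.nodup_ofList ss]
  have hitems : (get_attribute_counts_py s).items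
      = (PySem.List.dedup ss).map (fun k => (k, (ss.count k : Int))) := by
    unfold get_attribute_counts_py
    rw [← hss, hG]
    have hlhs := PySem.Dict.items_foldl_insert_fresh
        ((PySem.List.dedup ss).map (fun k => (k, (ss.count k : Int))))
        (fun p => p.1) (fun p => p.2) PySem.Dict.empty
        (fun a _ => PySem.Dict.contains_empty _) hkeys
    rw [hlhs]
    simp [PySem.Dict.empty]
  rw [PySem.Dict.foldl_insert_getD_add_one_eq_counter]
  have hvals : (get_attribute_counts_py s).values
      = (PySem.List.dedup ss).map (fun k => ((ss.count k : Int))) := by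
    simp only [PySem.Dict.values, hitems, List.map_map]
    rfl
  have hcnt : (fun k => ((ss.count k : Int))) = (fun k => ((s.count k : Int))) := by
    funext k
    rw [(PySem.List.sorted_perm s (fun x => x) false).count_eq]
  have hperm : (PySem.List.dedup ss).Perm (PySem.Set.ofList s) := by
    rw [PySem.List.dedup_eq_ofList]
    rw [List.perm_ext_iff_of_nodup (PySem.Set.nodup_ofList _) (PySem.Set.nodup_ofList _)]
    intro a
    rw [PySem.Set.mem_ofList, PySem.Set.mem_ofList, hss, PySem.List.mem_sorted]
  rw [hvals, hcnt]
  have : (PySem.Dict.counter s).values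
      = (PySem.Set.ofList s).map (fun k => ((s.count k : Int))) := by
    simp only [PySem.Dict.values, PySem.Dict.items_counter, List.map_map]
    rfl
  rw [this]
  exact hperm.map _

-- ===== VERDICT (by name: the statement is the Claim_ definition above) =====
theorem get_frequency_dictionary_py_spec : Claim_equal_get_frequency_dictionary_py := by
  intro sequence attributes _ hpre
  unfold Spec_get_frequency_dictionary_py
  cases sequence with
  | some s =>
    have h1 := stage2_eq ((get_attribute_counts_py s).items)
    have h2 : PySem.List.sorted ((get_attribute_counts_py s).items.map (fun p => p.2))
          (fun v => v)
        = PySem.List.sorted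
            ((s.foldl (fun d x => d.insert x (d.getD x 0 + 1)) PySem.Dict.empty).values)
            (fun v => v) := by
      apply PySem.List.sorted_eq_sorted_of_perm _ _ _ (fun a b h => h)
      exact stage1_values_perm s
    cases attributes with
    | none =>
      simp only [get_frequency_dictionary_py, get_frequency_dictionary_py_alt]
      rw [h1, h2]
    | some a =>
      simp only [get_frequency_dictionary_py, get_frequency_dictionary_py_alt]
      rw [h1, h2]
  | none =>
    cases attributes with
    | none => simp [Pre_get_frequency_dictionary_py] at hpre
    | some a =>
      simp only [get_frequency_dictionary_py, get_frequency_dictionary_py_alt,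
        Option.getD_some]
      rw [stage2_eq ((PySem.Dict.ofList a).items)]
      rfl
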